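-- pv_equiv track=rewrite | github.com/AVUKU-PRAGATHESWARI/GeeksForGeeks | Good or Bad string.py | isGoodorBad
-- ===== SOURCE A (Python) =====
-- def isGoodorBad(S):
--     vowels = 'aeiou'
--     vowel_count = 0
--     consonant_count = 0
--
--     for char in S:
--
--         if char == '?':
--             vowel_count += 1
--             consonant_count += 1
--
--         elif char in vowels:
--             vowel_count += 1
--             consonant_count = 0
--
--         else:
--             consonant_count += 1
--             vowel_count = 0
--
--         if consonant_count == 4 or vowel_count == 6:
--             return 0
--
--     return 1
-- ===== SOURCE B (Python) =====
-- def isGoodorBad(S):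
--     vowels = 'aeiou'
--
--     def window(i, k, pred):
--         return i + k <= len(S) and all(pred(c) for c in S[i:i + k])
--
--     bad = any(window(i, 4, lambda c: c not in vowels) for i in range(len(S) + 1)) or \
--           any(window(i, 6, lambda c: c in vowels + '?') for i in range(len(S) + 1))
--     return 0 if bad else 1
-- ===== Notes on version B (the rewrite author's own statement) =====
-- stated objective: alternative
-- what changed: Replaces the stateful per-character streak counters (with '?' double-counting and resets) by a declarative existence check: the string is bad iff some suffix starts with a window of 4 non-vowels or 6 characters from [aeiou?].
import Mathlib
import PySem

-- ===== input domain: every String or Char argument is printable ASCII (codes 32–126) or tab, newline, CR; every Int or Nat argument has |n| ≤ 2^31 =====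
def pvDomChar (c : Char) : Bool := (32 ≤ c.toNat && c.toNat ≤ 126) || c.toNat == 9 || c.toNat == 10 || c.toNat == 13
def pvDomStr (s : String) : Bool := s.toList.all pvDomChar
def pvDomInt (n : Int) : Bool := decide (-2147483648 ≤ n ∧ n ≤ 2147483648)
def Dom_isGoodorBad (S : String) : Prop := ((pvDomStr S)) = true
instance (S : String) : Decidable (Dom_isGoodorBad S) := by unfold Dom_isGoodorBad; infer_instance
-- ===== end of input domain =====

-- B replaces A's stateful streak counters by a declarative check over all suffixes
-- (a window of 4 non-vowels or 6 of [aeiou?] exists); same O(n·const) cost, alternative structure.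

-- ===== PORT A =====
def pvVowels : List Char := ['a', 'e', 'i', 'o', 'u']

-- A's for-loop with early return, as structural recursion over the characters
def isGoodorBad_go (l : List Char) (vowel_count consonant_count : Int) : Int :=
  match l with
  | [] => 1
  | char :: rest =>
    if char = '?' then
      let vowel_count := vowel_count + 1
      let consonant_count := consonant_count + 1
      if consonant_count = 4 ∨ vowel_count = 6 then 0
      else isGoodorBad_go rest vowel_count consonant_count
    else if char ∈ pvVowels then
      let vowel_count := vowel_count + 1
      let consonant_count : Int := 0
      if consonant_count = 4 ∨ vowel_count = 6 then 0
      else isGoodorBad_go rest vowel_count consonant_count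
    else
      let consonant_count := consonant_count + 1
      let vowel_count : Int := 0
      if consonant_count = 4 ∨ vowel_count = 6 then 0
      else isGoodorBad_go rest vowel_count consonant_count

def isGoodorBad (S : String) : Int := isGoodorBad_go S.toList 0 0

-- ===== PORT B =====
-- Source B's window(i, k, pred): i + k <= len(S) and all(pred(c) for c in S[i:i+k]);
-- the slice S[i:i+k] (0 ≤ i ≤ i+k) is exactly (l.drop i).take k
def pvWindow (l : List Char) (i k : Nat) (pred : Char → Bool) : Bool :=
  decide (i + k ≤ l.length) && ((l.drop i).take k).all pred

def isGoodorBad_alt (S : String) : Int :=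
  let l := S.toList
  let bad := ((List.range (l.length + 1)).any fun i =>
                pvWindow l i 4 (fun c => !(decide (c ∈ pvVowels)))) ||
             ((List.range (l.length + 1)).any fun i =>
                pvWindow l i 6 (fun c => decide (c ∈ pvVowels) || decide (c = '?')))
  if bad then 0 else 1

-- ===== PRECONDITION & SPEC =====
def Spec_isGoodorBad (S : String) (out : Int) : Prop := out = isGoodorBad_alt S
instance (S : String) (out : Int) : Decidable (Spec_isGoodorBad S out) := by unfold Spec_isGoodorBad; infer_instance

-- ===== CLAIM (what is proved, stated in full; the proofs are below) =====
def Claim_equal_isGoodorBad : Prop := ∀ (S : String), Dom_isGoodorBad S → Spec_isGoodorBad S (isGoodorBad S)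

-- ===== LEMMAS AND PROOFS =====

-- proof-side prefix window: the first k characters exist and satisfy p
def pvWin (t : List Char) (k : Nat) (p : Char → Bool) : Bool :=
  decide (k ≤ t.length) && (t.take k).all p

-- abbreviations for the two predicates of B (proof-side only)
def pvNV (c : Char) : Bool := !(decide (c ∈ pvVowels))
def pvVQ (c : Char) : Bool := decide (c ∈ pvVowels) || decide (c = '?')

lemma pvWin_zero (t : List Char) (p : Char → Bool) : pvWin t 0 p = true := by
  simp [pvWin]

lemma pvWin_cons (c : Char) (t : List Char) (k : Nat) (p : Char → Bool) :
    pvWin (c :: t) (k + 1) p = (p c && pvWin t k p) := by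
  simp [pvWin, Bool.and_left_comm]

lemma pvWin_mono {t : List Char} {p : Char → Bool} {k k' : Nat} (h : k ≤ k')
    (hw : pvWin t k' p = true) : pvWin t k p = true := by
  simp only [pvWin, Bool.and_eq_true, decide_eq_true_eq, List.all_eq_true] at hw ⊢
  refine ⟨le_trans h hw.1, fun x hx => hw.2 x ?_⟩
  have heq : t.take k = (t.take k').take k := by rw [List.take_take, Nat.min_eq_left h]
  exact List.take_subset _ _ (heq ▸ hx)

lemma tails_any_self {l : List Char} {f : List Char → Bool} (h : f l = true) :
    l.tails.any f = true := by
  exact List.any_eq_true.mpr ⟨l, by simp, h⟩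

lemma tails_any_cons (c : Char) (l : List Char) (f : List Char → Bool) :
    (c :: l).tails.any f = (f (c :: l) || l.tails.any f) := by
  simp [List.tails]

lemma goA_zero_or_one (l : List Char) (vc cc : Int) :
    isGoodorBad_go l vc cc = 0 ∨ isGoodorBad_go l vc cc = 1 := by
  induction l generalizing vc cc with
  | nil => right; rfl
  | cons c rest ih =>
    rw [isGoodorBad_go]
    by_cases h1 : c = '?' <;> by_cases h2 : c ∈ pvVowels <;>
      simp only [h1, h2, if_pos, if_false] <;>
      split_ifs <;> first | (left; rfl) | exact ih _ _

-- main characterization: A's counters return 0 iff some window exists (with head start vc/cc)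
set_option maxHeartbeats 2000000 in
lemma goA_char (l : List Char) (vc cc : Int) (hv0 : 0 ≤ vc) (hv : vc < 6)
    (hc0 : 0 ≤ cc) (hc : cc < 4) :
    (isGoodorBad_go l vc cc = 0 ↔
      (pvWin l (4 - cc).toNat pvNV = true ∨ l.tails.any (fun t => pvWin t 4 pvNV) = true ∨
       pvWin l (6 - vc).toNat pvVQ = true ∨ l.tails.any (fun t => pvWin t 6 pvVQ) = true)) := by
  induction l generalizing vc cc with
  | nil =>
    have h4 : (4 - cc).toNat ≠ 0 := by omega
    have h6 : (6 - vc).toNat ≠ 0 := by omega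
    simp [isGoodorBad_go, pvWin, h4, h6]
  | cons c rest ih =>
    rw [isGoodorBad_go]
    have e4 : (4 - cc).toNat = (4 - (cc + 1)).toNat + 1 := by omega
    have e6 : (6 - vc).toNat = (6 - (vc + 1)).toNat + 1 := by omega
    by_cases h1 : c = '?'
    · have hnv : pvNV c = true := by subst h1; decide
      have hvq : pvVQ c = true := by subst h1; decide
      rw [if_pos h1]
      by_cases hhit : cc + 1 = 4 ∨ vc + 1 = 6
      · rw [if_pos hhit]
        simp only [true_iff]
        rcases hhit with h | h
        · left
          have : (4 - cc).toNat = 1 := by omega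
          rw [this, pvWin_cons, hnv, pvWin_zero]; rfl
        · right; right; left
          have : (6 - vc).toNat = 1 := by omega
          rw [this, pvWin_cons, hvq, pvWin_zero]; rfl
      · rw [if_neg hhit]
        rw [ih (vc + 1) (cc + 1) (by omega) (by omega) (by omega) (by omega)]
        rw [e4, e6, pvWin_cons, pvWin_cons, hnv,
            tails_any_cons, tails_any_cons, pvWin_cons, pvWin_cons, hnv, hvq]
        simp only [Bool.true_and, Bool.or_eq_true]
        have m4 : pvWin rest 3 pvNV = true →
            pvWin rest (4 - (cc + 1)).toNat pvNV = true := pvWin_mono (by omega)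
        have m6 : pvWin rest 5 pvVQ = true →
            pvWin rest (6 - (vc + 1)).toNat pvVQ = true := pvWin_mono (by omega)
        tauto
    · rw [if_neg h1]
      by_cases h2 : c ∈ pvVowels
      · have hnv : pvNV c = false := by simp [pvNV, h2]
        have hvq : pvVQ c = true := by simp [pvVQ, h2]
        rw [if_pos h2]
        by_cases hhit : (0 : Int) = 4 ∨ vc + 1 = 6
        · rw [if_pos hhit]
          simp only [true_iff]
          have h : vc + 1 = 6 := by omega
          right; right; left
          have : (6 - vc).toNat = 1 := by omega
          rw [this, pvWin_cons, hvq, pvWin_zero]; rfl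
        · rw [if_neg hhit]
          rw [ih (vc + 1) 0 (by omega) (by omega) (by omega) (by omega)]
          rw [e6, pvWin_cons, hvq,
              tails_any_cons, tails_any_cons, pvWin_cons, pvWin_cons, hnv, hvq]
          have e40 : ((4 : Int) - 0).toNat = 4 := by omega
          rw [e40]
          have e4c : (4 - cc).toNat ≠ 0 := by omega
          obtain ⟨m, hm⟩ : ∃ m, (4 - cc).toNat = m + 1 := ⟨(4 - cc).toNat - 1, by omega⟩
          rw [hm, pvWin_cons, hnv]
          simp only [Bool.false_and, Bool.true_and, Bool.or_eq_true, Bool.false_eq_true,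
            false_or]
          have m6 : pvWin rest 5 pvVQ = true →
              pvWin rest (6 - (vc + 1)).toNat pvVQ = true := pvWin_mono (by omega)
          have t4 : pvWin rest 4 pvNV = true →
              (rest.tails.any fun t => pvWin t 4 pvNV) = true := fun h => tails_any_self h
          tauto
      · have hnv : pvNV c = true := by simp [pvNV, h2]
        have hvq : pvVQ c = false := by simp [pvVQ, h2, h1]
        rw [if_neg h2]
        by_cases hhit : cc + 1 = 4 ∨ (0 : Int) = 6
        · rw [if_pos hhit]
          simp only [true_iff]
          have h : cc + 1 = 4 := by omega
          left
          have : (4 - cc).toNat = 1 := by omega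
          rw [this, pvWin_cons, hnv, pvWin_zero]; rfl
        · rw [if_neg hhit]
          rw [ih 0 (cc + 1) (by omega) (by omega) (by omega) (by omega)]
          rw [e4, pvWin_cons, hnv,
              tails_any_cons, tails_any_cons, pvWin_cons, pvWin_cons, hnv, hvq]
          have e60 : ((6 : Int) - 0).toNat = 6 := by omega
          rw [e60]
          obtain ⟨m, hm⟩ : ∃ m, (6 - vc).toNat = m + 1 := ⟨(6 - vc).toNat - 1, by omega⟩
          rw [hm, pvWin_cons, hvq]
          simp only [Bool.false_and, Bool.true_and, Bool.or_eq_true, Bool.false_eq_true,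
            false_or]
          have m4 : pvWin rest 3 pvNV = true →
              pvWin rest (4 - (cc + 1)).toNat pvNV = true := pvWin_mono (by omega)
          have t6 : pvWin rest 6 pvVQ = true →
              (rest.tails.any fun t => pvWin t 6 pvVQ) = true := fun h => tails_any_self h
          tauto

lemma windowAt_eq (l : List Char) (i k : Nat) (p : Char → Bool) (hi : i ≤ l.length) :
    pvWindow l i k p = pvWin (l.drop i) k p := by
  unfold pvWindow pvWin
  congr 1
  rw [decide_eq_decide]
  rw [List.length_drop]
  omega

lemma tails_eq_map_drop (l : List Char) :
    l.tails = (List.range (l.length + 1)).map l.drop := by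
  induction l with
  | nil => simp
  | cons c t ih =>
    have h : List.map (fun n => List.drop n (c :: t)) (List.range (t.length + 1 + 1)) =
        (c :: t) :: List.map (fun n => List.drop n t) (List.range (t.length + 1)) := by
      rw [List.range_succ_eq_map, List.map_cons, List.map_map]
      rfl
    rw [List.length_cons, h, ← ih, List.tails]

lemma any_windowAt (l : List Char) (k : Nat) (p : Char → Bool) :
    ((List.range (l.length + 1)).any fun i => pvWindow l i k p) =
      l.tails.any (fun t => pvWin t k p) := by
  rw [tails_eq_map_drop, List.any_map, Bool.eq_iff_iff]
  simp only [List.any_eq_true, Function.comp]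
  constructor
  · rintro ⟨i, hi, hw⟩
    exact ⟨i, hi, by
      rwa [windowAt_eq l i k p (Nat.lt_succ_iff.mp (List.mem_range.mp hi))] at hw⟩
  · rintro ⟨i, hi, hw⟩
    exact ⟨i, hi, by
      rwa [windowAt_eq l i k p (Nat.lt_succ_iff.mp (List.mem_range.mp hi))]⟩

-- ===== VERDICT (by name: the statement is the Claim_ definition above) =====
theorem isGoodorBad_spec : Claim_equal_isGoodorBad := by
  intro S _
  unfold Spec_isGoodorBad isGoodorBad isGoodorBad_alt
  have hnv : (fun c => !(decide (c ∈ pvVowels))) = pvNV := rfl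
  have hvq : (fun c => (decide (c ∈ pvVowels) || decide (c = '?'))) = pvVQ := rfl
  simp only [hnv, hvq, any_windowAt]
  have hchar := goA_char S.toList 0 0 (by norm_num) (by norm_num) (by norm_num) (by norm_num)
  have e4 : ((4 : Int) - 0).toNat = 4 := by omega
  have e6 : ((6 : Int) - 0).toNat = 6 := by omega
  rw [e4, e6] at hchar
  by_cases hbad :
      (S.toList.tails.any (fun t => pvWin t 4 pvNV) ||
       S.toList.tails.any (fun t => pvWin t 6 pvVQ)) = true
  · rw [if_pos hbad]
    rcases Bool.or_eq_true_iff.mp hbad with h | h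
    · exact hchar.mpr (Or.inr (Or.inl h))
    · exact hchar.mpr (Or.inr (Or.inr (Or.inr h)))
  · rw [if_neg hbad]
    rcases goA_zero_or_one S.toList 0 0 with h | h
    · exfalso
      rcases hchar.mp h with hw | ht | hw | ht
      · exact hbad (Bool.or_eq_true_iff.mpr (Or.inl (tails_any_self hw)))
      · exact hbad (Bool.or_eq_true_iff.mpr (Or.inl ht))
      · exact hbad (Bool.or_eq_true_iff.mpr (Or.inr (tails_any_self hw)))
      · exact hbad (Bool.or_eq_true_iff.mpr (Or.inr ht))
    · exact h
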